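-- pv_equiv track=rewrite | github.com/jonas-skywalker/bwinf2020-round1 | aufgabe5/aufgabe5tsp.py | gen_adjazenz_greedy
-- ===== SOURCE A (Python) =====
-- def gen_adjazenz_greedy(data, verbleibende_geschenke):
--     adjazenz1 = dict()
--     nodes1 = list(data.keys())
--     adjazenz2 = dict()
--     nodes2 = [str(i) for i in verbleibende_geschenke]
--
--     for key in nodes1:
--         adjazenz1[key] = dict()
--         for k in nodes2:
--             adjazenz1[key][k] = 4
--     for key, value in data.items():
--         for v in value:
--             if v in verbleibende_geschenke:
--                 adjazenz1[key][str(v)] = value.index(v) + 1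
--
--     for key in nodes2:
--         adjazenz2[key] = dict()
--         for k in nodes1:
--             adjazenz2[key][k] = 0
--     adjazenz1.update(adjazenz2)
--     return adjazenz1, nodes1, nodes2
-- ===== SOURCE B (Python) =====
-- def _weight(value, gift):
--     for idx, v in enumerate(value):
--         if v == gift:
--             return idx + 1
--     return 4
--
--
-- def gen_adjazenz_greedy(data, verbleibende_geschenke):
--     nodes1 = list(data)
--     nodes2 = [str(i) for i in verbleibende_geschenke]
--     values = list(data.values())
--     # column-major: one weight column per remaining gift, then transpose into rows
--     cols = [[_weight(value, gift) for value in values] for gift in verbleibende_geschenke]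
--     adjazenz1 = {}
--     for r, key in enumerate(nodes1):
--         adjazenz1[key] = dict(zip(nodes2, [col[r] for col in cols]))
--     for s in nodes2:
--         adjazenz1[s] = dict.fromkeys(nodes1, 0)
--     return adjazenz1, nodes1, nodes2
-- ===== Notes on version B (the rewrite author's own statement) =====
-- stated objective: alternative
-- what changed: B computes the weight matrix transposed: one column per remaining gift (each cell found by a direct first-match scan of the wish list), then transposes the columns into the row dicts via dict(zip(...)), and writes the zero rows by dict.fromkeys - instead of A's row-wise fill-every-cell-with-4 followed by a patch loop using membership tests and value.index, a separate adjazenz2 dict and a final update().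
import Mathlib
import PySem

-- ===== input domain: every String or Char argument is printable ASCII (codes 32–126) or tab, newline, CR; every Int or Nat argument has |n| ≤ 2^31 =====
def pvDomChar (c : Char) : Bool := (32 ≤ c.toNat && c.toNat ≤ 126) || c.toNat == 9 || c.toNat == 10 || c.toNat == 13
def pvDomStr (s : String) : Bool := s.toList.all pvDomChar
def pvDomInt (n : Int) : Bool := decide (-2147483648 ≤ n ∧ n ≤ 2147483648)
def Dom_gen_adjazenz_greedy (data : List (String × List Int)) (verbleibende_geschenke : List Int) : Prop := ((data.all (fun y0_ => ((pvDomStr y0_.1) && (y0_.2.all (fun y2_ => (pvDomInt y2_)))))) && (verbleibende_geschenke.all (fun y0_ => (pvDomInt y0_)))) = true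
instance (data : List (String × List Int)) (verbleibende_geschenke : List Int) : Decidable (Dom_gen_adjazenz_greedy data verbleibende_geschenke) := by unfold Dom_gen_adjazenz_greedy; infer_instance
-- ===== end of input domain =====

-- B computes the transposed weight matrix column-by-column (one column per remaining gift, each
-- cell by a direct first-match scan) and then transposes the columns into the row dicts, instead
-- of A's row-wise fill-with-4 then patch-by-value.index scheme (an alternative decomposition).


-- ===== PORT A =====
-- 'adjazenz1[key][str(v)] = …' is ported as 'modify key': the key is always present at that
-- point (it was inserted for every key of data in the previous loop), so no KeyError can occur.
def gen_adjazenz_greedy (data : List (String × List Int)) (verbleibende_geschenke : List Int) : (List (String × List (String × Int))) × List String × List String :=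
  let d := PySem.Dict.ofList data
  let nodes1 := d.keys
  let nodes2 := verbleibende_geschenke.map (fun i => PySem.Int.toStr i)
  let adjazenz1 : PySem.Dict String (PySem.Dict String Int) :=
    nodes1.foldl (fun a key => a.insert key (nodes2.foldl (fun inner k => inner.insert k 4) PySem.Dict.empty)) PySem.Dict.empty
  let adjazenz1 := d.items.foldl (fun a kv =>
      kv.2.foldl (fun a v =>
        if v ∈ verbleibende_geschenke then
          a.modify kv.1 PySem.Dict.empty (fun inner => inner.insert (PySem.Int.toStr v) ((((PySem.List.index? kv.2 v).getD 0 : Nat) : Int) + 1))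
        else a) a) adjazenz1
  let adjazenz2 : PySem.Dict String (PySem.Dict String Int) :=
    nodes2.foldl (fun a key => a.insert key (nodes1.foldl (fun inner k => inner.insert k 0) PySem.Dict.empty)) PySem.Dict.empty
  let adjazenz1 := adjazenz1.update adjazenz2.items
  (adjazenz1.items.map (fun p => (p.1, p.2.items)), nodes1, nodes2)

-- ===== PORT B =====
-- _weight(value, gift): first-match scan over enumerate(value) with an early return
def pvWeightGo (gift : Int) : List (Int × Int) → Int
  | [] => 4
  | p :: rest => if p.2 = gift then p.1 + 1 else pvWeightGo gift rest

def pvWeight (value : List Int) (gift : Int) : Int := pvWeightGo gift (PySem.List.enumerate value 0)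

-- 'col[r]' is always in range (every column has length len(nodes1)), so pyGetD's default is unreachable
def gen_adjazenz_greedy_alt (data : List (String × List Int)) (verbleibende_geschenke : List Int) : (List (String × List (String × Int))) × List String × List String :=
  let d := PySem.Dict.ofList data
  let nodes1 := d.keys
  let nodes2 := verbleibende_geschenke.map (fun i => PySem.Int.toStr i)
  let values := d.values
  let cols := verbleibende_geschenke.map (fun gift => values.map (fun value => pvWeight value gift))
  let adjazenz1 : PySem.Dict String (PySem.Dict String Int) :=
    (PySem.List.enumerate nodes1 0).foldl
      (fun a p => a.insert p.2 (PySem.Dict.ofList (nodes2.zip (cols.map (fun col => PySem.List.pyGetD col p.1 0))))) PySem.Dict.empty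
  let adjazenz1 := nodes2.foldl
      (fun a s => a.insert s (PySem.Dict.ofList (nodes1.map (fun key => (key, (0 : Int)))))) adjazenz1
  (adjazenz1.items.map (fun p => (p.1, p.2.items)), nodes1, nodes2)

-- ===== PRECONDITION & SPEC =====
def Spec_gen_adjazenz_greedy (data : List (String × List Int)) (verbleibende_geschenke : List Int) (out : (List (String × List (String × Int))) × List String × List String) : Prop := out = gen_adjazenz_greedy_alt data verbleibende_geschenke
instance (data : List (String × List Int)) (verbleibende_geschenke : List Int) (out : (List (String × List (String × Int))) × List String × List String) : Decidable (Spec_gen_adjazenz_greedy data verbleibende_geschenke out) := by unfold Spec_gen_adjazenz_greedy; infer_instance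

-- ===== CLAIM (what is proved, stated in full; the proofs are below) =====
def Claim_equal_gen_adjazenz_greedy : Prop := ∀ (data : List (String × List Int)) (verbleibende_geschenke : List Int), Dom_gen_adjazenz_greedy data verbleibende_geschenke → Spec_gen_adjazenz_greedy data verbleibende_geschenke (gen_adjazenz_greedy data verbleibende_geschenke)

-- ===== LEMMAS AND PROOFS =====

-- ---- str(n) is injective ----
def pvDec (cs : List Char) : Nat := cs.foldl (fun a c => a * 10 + (c.toNat - 48)) 0

theorem pvTdcAcc : ∀ (f n : Nat) (ds : List Char),
    Nat.toDigitsCore 10 f n ds = Nat.toDigitsCore 10 f n [] ++ ds := by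
  intro f
  induction f with
  | zero => intro n ds; simp [Nat.toDigitsCore]
  | succ f ih =>
    intro n ds
    simp only [Nat.toDigitsCore]
    by_cases h : n / 10 = 0
    · simp [h]
    · simp only [h, if_false]
      rw [ih (n / 10) ((n % 10).digitChar :: ds), ih (n / 10) [(n % 10).digitChar]]
      simp

theorem pvDecCore : ∀ (f n : Nat), n < f → pvDec (Nat.toDigitsCore 10 f n []) = n := by
  intro f
  induction f with
  | zero => omega
  | succ f ih =>
    intro n hn
    simp only [Nat.toDigitsCore]
    by_cases h : n / 10 = 0
    · have h10 : n < 10 := by omega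
      simp only [h, if_true]
      have hm : n % 10 = n := Nat.mod_eq_of_lt h10
      rw [hm]
      unfold pvDec
      simp only [List.foldl_cons, List.foldl_nil]
      interval_cases n <;> decide
    · simp only [h, if_false]
      rw [pvTdcAcc]
      have hlt : n / 10 < f := by omega
      unfold pvDec
      rw [List.foldl_append]
      have := ih (n / 10) hlt
      unfold pvDec at this
      rw [this]
      simp only [List.foldl_cons, List.foldl_nil]
      have hm : n % 10 < 10 := Nat.mod_lt _ (by norm_num)
      have hdig : ((n % 10).digitChar.toNat - 48) = n % 10 := by
        interval_cases h : n % 10 <;> decide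
      rw [hdig]
      omega

theorem pvToDigitsInj (m n : Nat) (h : Nat.toDigits 10 m = Nat.toDigits 10 n) : m = n := by
  have hm := pvDecCore (m + 1) m (by omega)
  have hn := pvDecCore (n + 1) n (by omega)
  unfold Nat.toDigits at h
  rw [← hm, ← hn, h]

theorem pvTdcHead : ∀ (f n : Nat) (ds : List Char), 0 < f →
    ∃ k rest, k < 10 ∧ Nat.toDigitsCore 10 f n ds = Nat.digitChar k :: rest := by
  intro f
  induction f with
  | zero => omega
  | succ f ih =>
    intro n ds _
    simp only [Nat.toDigitsCore]
    by_cases h : n / 10 = 0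
    · exact ⟨n % 10, ds, Nat.mod_lt _ (by norm_num), by simp [h]⟩
    · simp only [h, if_false]
      cases f with
      | zero => exact ⟨n % 10, ds, Nat.mod_lt _ (by norm_num), by simp [Nat.toDigitsCore]⟩
      | succ f' => exact ih (n / 10) ((n % 10).digitChar :: ds) (by omega)

theorem pvToCharsInj {a b : Int} (h : PySem.Int.toChars a = PySem.Int.toChars b) : a = b := by
  unfold PySem.Int.toChars at h
  have hne : ∀ (n : Nat) (k : Nat) (rest : List Char), k < 10 → ('-' :: Nat.toDigits 10 n ≠ Nat.digitChar k :: rest) := by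
    intro n k rest hk heq
    have : '-' = Nat.digitChar k := by exact (List.cons.injEq _ _ _ _ ▸ heq).1
    interval_cases k <;> exact absurd this (by decide)
  by_cases ha : a < 0 <;> by_cases hb : b < 0
  · simp only [ha, hb, if_true] at h
    have := pvToDigitsInj _ _ (List.cons.injEq _ _ _ _ ▸ h).2
    omega
  · simp only [ha, hb, if_true, if_false] at h
    obtain ⟨k, rest, hk, heq⟩ := pvTdcHead (b.toNat + 1) b.toNat [] (by omega)
    exact absurd (h.trans heq) (hne _ _ _ hk)
  · simp only [ha, hb, if_true, if_false] at h
    obtain ⟨k, rest, hk, heq⟩ := pvTdcHead (a.toNat + 1) a.toNat [] (by omega)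
    exact absurd (h.symm.trans heq) (hne _ _ _ hk)
  · simp only [ha, hb, if_false] at h
    have := pvToDigitsInj _ _ h
    omega

theorem pvToStrInj {a b : Int} (h : PySem.Int.toStr a = PySem.Int.toStr b) : a = b := by
  apply pvToCharsInj
  rw [← PySem.Int.toList_toStr, ← PySem.Int.toList_toStr, h]

-- ---- generic dictionary loop facts ----
theorem pvOfList {κ ν : Type} [BEq κ] (ps : List (κ × ν)) :
    PySem.Dict.ofList ps = ps.foldl (fun a p => a.insert p.1 p.2) PySem.Dict.empty := by
  simp [PySem.Dict.ofList, PySem.Dict.update]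

theorem pvInsSelf {κ ν : Type} [BEq κ] [LawfulBEq κ] (d : PySem.Dict κ ν) (k : κ) (v : ν)
    (hnd : d.keys.Nodup) (h : d.get? k = some v) : d.insert k v = d := by
  have hc : d.contains k = true := by rw [PySem.Dict.contains_eq_isSome_get?, h]; rfl
  apply PySem.Dict.ext
  rw [PySem.Dict.items_insert_of_contains _ _ hc]
  conv_rhs => rw [← List.map_id d.items]
  apply List.map_congr_left
  intro p hp
  by_cases hk : (p.1 == k) = true
  · have hk' : p.1 = k := by simpa using hk
    have := PySem.Dict.get?_of_mem_items (d := d) (k := p.1) (v := p.2) (by simpa using hp) hnd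
    rw [hk', h] at this
    simp only [hk, if_true, id]
    have : p.2 = v := by simpa using this.symm
    rw [← hk', ← this]
  · simp [hk]

theorem pvGetDFoldIns {κ ν α : Type} [BEq κ] [LawfulBEq κ] (key : α → κ) (f : α → ν) :
    ∀ (l : List α) (d : PySem.Dict κ ν) (c : κ) (dflt : ν),
    (l.foldl (fun d x => d.insert (key x) (f x)) d).getD c dflt =
      match l.reverse.find? (fun x => key x == c) with
      | some x => f x
      | none => d.getD c dflt := by
  intro l
  induction l with
  | nil => intro d c dflt; rfl
  | cons x l ih =>
    intro d c dflt
    simp only [List.foldl_cons, List.reverse_cons, List.find?_append]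
    rw [ih]
    cases hf : l.reverse.find? (fun x => key x == c) with
    | some y => rfl
    | none =>
      simp only [Option.none_or]
      by_cases hk : (key x == c) = true
      · have he : key x = c := by simpa using hk
        subst he
        simp [List.find?, PySem.Dict.getD_insert_self]
      · have hne : c ≠ key x := by intro hh; exact hk (by simp [hh])
        simp [List.find?, hk, PySem.Dict.getD_insert_of_ne _ _ _ hne]

theorem pvGetFoldInsNotMem {κ ν : Type} [BEq κ] [LawfulBEq κ] :
    ∀ (ps : List (κ × ν)) (d : PySem.Dict κ ν) (k : κ), k ∉ ps.map (·.1) →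
    (ps.foldl (fun a p => a.insert p.1 p.2) d).get? k = d.get? k := by
  intro ps
  induction ps with
  | nil => intro d k _; rfl
  | cons p ps ih =>
    intro d k hk
    simp only [List.map_cons, List.mem_cons, not_or] at hk
    simp only [List.foldl_cons]
    rw [ih _ _ hk.2, PySem.Dict.get?_insert_of_ne _ _ hk.1]

theorem pvGetUpdateMem {κ ν : Type} [BEq κ] [LawfulBEq κ] :
    ∀ (ps : List (κ × ν)) (d : PySem.Dict κ ν) (k : κ) (v : ν),
    (ps.map (·.1)).Nodup → (k, v) ∈ ps →
    (ps.foldl (fun a p => a.insert p.1 p.2) d).get? k = some v := by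
  intro ps
  induction ps with
  | nil => intro d k v _ hm; cases hm
  | cons p ps ih =>
    intro d k v hnd hm
    simp only [List.map_cons, List.nodup_cons] at hnd
    simp only [List.foldl_cons]
    rcases List.mem_cons.mp hm with heq | hmem
    · subst heq
      rw [pvGetFoldInsNotMem _ _ _ hnd.1, PySem.Dict.get?_insert_self]
    · exact ih _ _ _ hnd.2 hmem

theorem pvInsertAt {ν : Type} (pre post : List (String × ν)) (key : String) (cur v : ν)
    (hnd : ((pre ++ (key, cur) :: post).map (·.1)).Nodup) :
    (PySem.Dict.mk (pre ++ (key, cur) :: post)).insert key v = PySem.Dict.mk (pre ++ (key, v) :: post) := by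
  simp only [List.map_append, List.map_cons, List.nodup_append, List.nodup_cons] at hnd
  have hpre : key ∉ pre.map (·.1) := fun hm => hnd.2.2 key hm key (by simp) rfl
  have hpost : key ∉ post.map (·.1) := hnd.2.1.1
  have hc : (PySem.Dict.mk (pre ++ (key, cur) :: post)).contains key = true := by
    simp only [PySem.Dict.contains]
    exact List.any_eq_true.mpr ⟨(key, cur), by simp, by simp⟩
  apply PySem.Dict.ext
  rw [PySem.Dict.items_insert_of_contains _ _ hc]
  show List.map _ (pre ++ (key, cur) :: post) = _
  rw [List.map_append, List.map_cons]
  congr 1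
  · conv_rhs => rw [← List.map_id pre]
    apply List.map_congr_left
    intro p hp
    have : p.1 ≠ key := fun h => hpre (h ▸ List.mem_map_of_mem hp)
    simp [this]
  · congr 1
    · simp
    · conv_rhs => rw [← List.map_id post]
      apply List.map_congr_left
      intro p hp
      have : p.1 ≠ key := fun h => hpost (h ▸ List.mem_map_of_mem hp)
      simp [this]

theorem pvGetDAt {ν : Type} (pre post : List (String × ν)) (key : String) (cur : ν) (dflt : ν)
    (hnd : ((pre ++ (key, cur) :: post).map (·.1)).Nodup) :
    (PySem.Dict.mk (pre ++ (key, cur) :: post)).getD key dflt = cur := by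
  exact PySem.Dict.getD_of_mem_items _ (by simp) hnd dflt

theorem pvFoldAt {ν : Type} (op : ν → Int → ν) (dflt : ν) :
    ∀ (l : List Int) (pre post : List (String × ν)) (key : String) (cur : ν),
    ((pre ++ (key, cur) :: post).map (·.1)).Nodup →
    l.foldl (fun a v => a.modify key dflt (fun inn => op inn v)) (PySem.Dict.mk (pre ++ (key, cur) :: post))
      = PySem.Dict.mk (pre ++ (key, l.foldl op cur) :: post) := by
  intro l
  induction l with
  | nil => intro pre post key cur _; rfl
  | cons x l ih =>
    intro pre post key cur hnd
    simp only [List.foldl_cons]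
    rw [show (PySem.Dict.mk (pre ++ (key, cur) :: post)).modify key dflt (fun inn => op inn x)
          = PySem.Dict.mk (pre ++ (key, op cur x) :: post) from ?_]
    · exact ih pre post key (op cur x) (by simpa using hnd)
    · show (PySem.Dict.mk (pre ++ (key, cur) :: post)).insert key _ = _
      rw [pvGetDAt _ _ _ _ _ hnd, pvInsertAt _ _ _ _ _ hnd]

-- ---- the per-row inner dictionaries of A and of B ----
def pvBase (verb : List Int) : PySem.Dict String Int :=
  (verb.map (fun i => PySem.Int.toStr i)).foldl (fun inner k => inner.insert k 4) PySem.Dict.empty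

def pvGval (value : List Int) (v : Int) : Int := (((PySem.List.index? value v).getD 0 : Nat) : Int) + 1

def pvAinner (verb value : List Int) : PySem.Dict String Int :=
  (value.filter (fun v => decide (v ∈ verb))).foldl
    (fun c v => c.insert (PySem.Int.toStr v) (pvGval value v)) (pvBase verb)

def pvCinner (verb value : List Int) : PySem.Dict String Int :=
  PySem.Dict.ofList ((verb.map (fun i => PySem.Int.toStr i)).zip (verb.map (fun g => pvWeight value g)))

theorem pvBaseGetD (verb : List Int) (c : String) : (pvBase verb).getD c 4 = 4 := by
  unfold pvBase
  rw [pvGetDFoldIns (fun x => x) (fun _ => (4 : Int))]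
  cases (verb.map (fun i => PySem.Int.toStr i)).reverse.find? (fun x => x == c) with
  | some x => rfl
  | none => simp [PySem.Dict.getD_empty]

theorem pvAinnerGetD (verb value : List Int) (i : Int) (hi : i ∈ verb) :
    (pvAinner verb value).getD (PySem.Int.toStr i) 4
      = if i ∈ value then pvGval value i else 4 := by
  unfold pvAinner
  rw [pvGetDFoldIns (fun v => PySem.Int.toStr v) (fun v => pvGval value v)]
  cases hf : (value.filter (fun v => decide (v ∈ verb))).reverse.find? (fun x => PySem.Int.toStr x == PySem.Int.toStr i) with
  | some v =>
    have hp := List.find?_some hf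
    have hv : v = i := pvToStrInj (by simpa using hp)
    subst hv
    have hmem : v ∈ value := by
      have := List.mem_of_find?_eq_some hf
      exact (List.mem_filter.mp (List.mem_reverse.mp this)).1
    simp [hmem]
  | none =>
    have hnm : i ∉ value := by
      intro hmem
      have : i ∈ (value.filter (fun v => decide (v ∈ verb))).reverse :=
        List.mem_reverse.mpr (List.mem_filter.mpr ⟨hmem, by simpa using hi⟩)
      have := List.find?_eq_none.mp hf i this
      simp at this
    simp [hnm, pvBaseGetD]

-- ---- B's _weight is 'first index + 1, else 4' ----
theorem pvWeightAux (gift : Int) : ∀ (value : List Int) (s : Int),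
    pvWeightGo gift (PySem.List.enumerate value s) =
      match PySem.List.index? value gift with
      | some j => s + (j : Int) + 1
      | none => 4 := by
  intro value
  induction value with
  | nil => intro s; simp [PySem.List.enumerate, PySem.List.index?, pvWeightGo]
  | cons x xs ih =>
    intro s
    rw [PySem.List.enumerate_cons]
    by_cases hx : x = gift
    · subst hx
      simp [pvWeightGo, PySem.List.index?, List.idxOf?_cons]
    · have hb : (x == gift) = false := by simp [hx]
      simp only [pvWeightGo, if_neg (by simpa using Ne.symm hx ∘ Eq.symm), PySem.List.index?, List.idxOf?_cons, hb]
      rw [show PySem.List.index? xs gift = List.idxOf? gift xs from rfl] at ih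
      rw [ih (s + 1)]
      cases List.idxOf? gift xs with
      | none => rfl
      | some j =>
        simp only [Option.map_some]
        push_cast
        ring

theorem pvWeightEq (value : List Int) (gift : Int) :
    pvWeight value gift = if gift ∈ value then pvGval value gift else 4 := by
  unfold pvWeight
  rw [pvWeightAux]
  by_cases hm : gift ∈ value
  · have hs : (List.idxOf? gift value).isSome := List.isSome_idxOf?.mpr hm
    obtain ⟨j, hj⟩ := Option.isSome_iff_exists.mp hs
    have hj' : PySem.List.index? value gift = some j := hj
    rw [hj']
    simp [hm, pvGval, hj]
  · have hn : PySem.List.index? value gift = none := by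
      simp only [PySem.List.index?]
      rw [List.idxOf?_eq_none_iff]
      exact hm
    rw [hn]
    simp [hm]

-- ---- B's inner row dict equals A's ----
theorem pvCinnerGetD (verb value : List Int) (i : Int) (hi : i ∈ verb) :
    (pvCinner verb value).getD (PySem.Int.toStr i) 4
      = if i ∈ value then pvGval value i else 4 := by
  unfold pvCinner
  rw [pvOfList, List.zip_map', List.foldl_map]
  rw [pvGetDFoldIns (fun a => PySem.Int.toStr a) (fun a => pvWeight value a)]
  cases hf : verb.reverse.find? (fun x => PySem.Int.toStr x == PySem.Int.toStr i) with
  | some a =>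
    have hp := List.find?_some hf
    have ha : a = i := pvToStrInj (by simpa using hp)
    subst ha
    exact pvWeightEq value a
  | none =>
    exfalso
    have := List.find?_eq_none.mp hf i (List.mem_reverse.mpr hi)
    simp at this

theorem pvInnerEq (verb value : List Int) : pvAinner verb value = pvCinner verb value := by
  have hka : (pvAinner verb value).keys = PySem.Set.ofList (verb.map (fun i => PySem.Int.toStr i)) := by
    unfold pvAinner pvBase
    rw [PySem.Dict.keys_foldl_insert_key _ (fun v => PySem.Int.toStr v) (fun _ v => pvGval value v),
        PySem.Dict.keys_foldl_insert _ (fun _ _ => (4 : Int))]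
    rw [PySem.Dict.keys_empty, PySem.Set.update_nil_left]
    rw [PySem.Set.update_eq_append_filter]
    have : (PySem.Set.ofList ((value.filter (fun v => decide (v ∈ verb))).map (fun v => PySem.Int.toStr v))).filter
        (fun y => !(PySem.Set.ofList (verb.map (fun i => PySem.Int.toStr i))).contains y) = [] := by
      rw [List.filter_eq_nil_iff]
      intro y hy
      have hy' : y ∈ (value.filter (fun v => decide (v ∈ verb))).map (fun v => PySem.Int.toStr v) :=
        (PySem.Set.mem_ofList _ _).mp hy
      obtain ⟨v, hv, rfl⟩ := List.mem_map.mp hy'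
      have hvv : v ∈ verb := by simpa using (List.mem_filter.mp hv).2
      have : PySem.Int.toStr v ∈ PySem.Set.ofList (verb.map (fun i => PySem.Int.toStr i)) :=
        (PySem.Set.mem_ofList _ _).mpr (List.mem_map_of_mem hvv)
      have hc := (PySem.Set.contains_iff _ _).mpr this
      rw [hc]
      simp
    rw [this, List.append_nil]
  have hkc : (pvCinner verb value).keys = PySem.Set.ofList (verb.map (fun i => PySem.Int.toStr i)) := by
    unfold pvCinner
    rw [pvOfList, List.zip_map', List.foldl_map]
    rw [PySem.Dict.keys_foldl_insert_key verb (fun a => PySem.Int.toStr a) (fun _ a => pvWeight value a)]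
    rw [PySem.Dict.keys_empty, PySem.Set.update_nil_left]
  apply PySem.Dict.ext
  rw [PySem.Dict.items_eq_map_keys _ (by rw [hka]; exact PySem.Set.nodup_ofList _) 4,
      PySem.Dict.items_eq_map_keys _ (by rw [hkc]; exact PySem.Set.nodup_ofList _) 4,
      hka, hkc]
  apply List.map_congr_left
  intro c hc
  obtain ⟨i, hi, rfl⟩ := List.mem_map.mp ((PySem.Set.mem_ofList _ _).mp hc)
  rw [pvAinnerGetD verb value i hi, pvCinnerGetD verb value i hi]

-- ---- stage 2: A patches each row in place; the rows become pvAinner ----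
theorem pvStage2 (verb : List Int) :
    ∀ (its : List (String × List Int)) (pre : List (String × PySem.Dict String Int)),
    ((pre ++ its.map (fun kv => (kv.1, pvBase verb))).map (·.1)).Nodup →
    its.foldl (fun a kv =>
        kv.2.foldl (fun a v =>
          if v ∈ verb then
            a.modify kv.1 PySem.Dict.empty (fun inner => inner.insert (PySem.Int.toStr v) ((((PySem.List.index? kv.2 v).getD 0 : Nat) : Int) + 1))
          else a) a)
      (PySem.Dict.mk (pre ++ its.map (fun kv => (kv.1, pvBase verb))))
      = PySem.Dict.mk (pre ++ its.map (fun kv => (kv.1, pvAinner verb kv.2))) := by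
  intro its
  induction its with
  | nil => intro pre _; simp
  | cons kv its ih =>
    intro pre hnd
    simp only [List.map_cons, List.foldl_cons]
    have hfun : (fun (a : PySem.Dict String (PySem.Dict String Int)) v =>
          if v ∈ verb then
            a.modify kv.1 PySem.Dict.empty (fun inner => inner.insert (PySem.Int.toStr v) ((((PySem.List.index? kv.2 v).getD 0 : Nat) : Int) + 1))
          else a)
        = (fun a v =>
          if (decide (v ∈ verb)) = true then
            a.modify kv.1 PySem.Dict.empty (fun inner => inner.insert (PySem.Int.toStr v) (pvGval kv.2 v))
          else a) := by
      funext a v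
      by_cases h : v ∈ verb <;> simp [h, pvGval]
    rw [hfun, ← List.foldl_filter]
    rw [pvFoldAt (fun inn v => inn.insert (PySem.Int.toStr v) (pvGval kv.2 v)) PySem.Dict.empty
          (kv.2.filter (fun v => decide (v ∈ verb))) pre (its.map (fun kv => (kv.1, pvBase verb))) kv.1 (pvBase verb)
          (by simpa using hnd)]
    rw [show List.foldl (fun inn v => inn.insert (PySem.Int.toStr v) (pvGval kv.2 v)) (pvBase verb)
          (List.filter (fun v => decide (v ∈ verb)) kv.2) = pvAinner verb kv.2 from rfl]
    have hre : pre ++ (kv.1, pvAinner verb kv.2) :: its.map (fun kv => (kv.1, pvBase verb))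
        = (pre ++ [(kv.1, pvAinner verb kv.2)]) ++ its.map (fun kv => (kv.1, pvBase verb)) := by
      simp
    rw [hre, ih (pre ++ [(kv.1, pvAinner verb kv.2)]) (by simpa using hnd)]
    simp

-- ---- stage 3: A's dict.update with adjazenz2 is B's direct insertion loop ----
theorem pvUpdFold (Z : PySem.Dict String Int) :
    ∀ (l : List String) (e adj : PySem.Dict String (PySem.Dict String Int)),
    adj.keys.Nodup → e.keys.Nodup → (∀ k v, e.get? k = some v → v = Z) →
    adj.update ((l.foldl (fun a k => a.insert k Z) e).items)
      = l.foldl (fun a k => a.insert k Z) (adj.update e.items) := by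
  intro l
  induction l with
  | nil => intro e adj _ _ _; rfl
  | cons k l ih =>
    intro e adj hadj he hev
    simp only [List.foldl_cons]
    have hev' : ∀ k' v, (e.insert k Z).get? k' = some v → v = Z := by
      intro k' v h
      by_cases hk : k' = k
      · subst hk; rw [PySem.Dict.get?_insert_self] at h; exact (Option.some.injEq _ _ ▸ h).symm
      · rw [PySem.Dict.get?_insert_of_ne _ _ hk] at h; exact hev k' v h
    rw [ih (e.insert k Z) adj hadj (PySem.Dict.nodup_keys_insert _ _ _ he) hev']
    congr 1
    by_cases hc : e.contains k = true
    · have hs : (e.get? k).isSome := by rw [← PySem.Dict.contains_eq_isSome_get?, hc]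
      obtain ⟨v, hv⟩ := Option.isSome_iff_exists.mp hs
      have hvz : v = Z := hev k v hv
      subst hvz
      rw [pvInsSelf e k v he hv]
      have hmem : (k, v) ∈ e.items := PySem.Dict.mem_items_of_get?_eq_some _ hv
      have : (adj.update e.items).get? k = some v := by
        show ((e.items.foldl (fun a p => a.insert p.1 p.2) adj)).get? k = some v
        exact pvGetUpdateMem e.items adj k v he hmem
      rw [pvInsSelf _ k v (PySem.Dict.nodup_keys_update adj e.items hadj) this]
    · rw [PySem.Dict.items_insert_of_not_contains _ _ (by simpa using hc)]
      show (e.items ++ [(k, Z)]).foldl (fun a p => a.insert p.1 p.2) adj = _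
      rw [List.foldl_append]
      rfl

-- ---- assembly: stage A (A's first two loops yield the pvAinner rows) ----
theorem pvStageA (data : List (String × List Int)) (verb : List Int) :
    (PySem.Dict.ofList data).items.foldl (fun a kv =>
        kv.2.foldl (fun a v =>
          if v ∈ verb then
            a.modify kv.1 PySem.Dict.empty (fun inner => inner.insert (PySem.Int.toStr v) ((((PySem.List.index? kv.2 v).getD 0 : Nat) : Int) + 1))
          else a) a)
      ((PySem.Dict.ofList data).keys.foldl
        (fun a key => a.insert key ((verb.map (fun i => PySem.Int.toStr i)).foldl (fun inner k => inner.insert k 4) PySem.Dict.empty))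
        PySem.Dict.empty)
      = PySem.Dict.mk ((PySem.Dict.ofList data).items.map (fun kv => (kv.1, pvAinner verb kv.2))) := by
  have hnd : ((PySem.Dict.ofList data).items.map (·.1)).Nodup := PySem.Dict.nodup_keys_ofList data
  have h1 : (PySem.Dict.ofList data).keys.foldl
        (fun a key => a.insert key ((verb.map (fun i => PySem.Int.toStr i)).foldl (fun inner k => inner.insert k 4) PySem.Dict.empty))
        PySem.Dict.empty
      = PySem.Dict.mk ((PySem.Dict.ofList data).items.map (fun kv => (kv.1, pvBase verb))) := by
    apply PySem.Dict.ext
    refine Eq.trans (PySem.Dict.items_foldl_insert_fresh (PySem.Dict.ofList data).keys (fun x => x)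
      (fun _ => pvBase verb) PySem.Dict.empty (fun a _ => PySem.Dict.contains_empty a) (by simp)) ?_
    show [] ++ _ = _
    rw [List.nil_append]
    show ((PySem.Dict.ofList data).items.map (·.1)).map (fun a => (a, pvBase verb)) = _
    rw [List.map_map]
    rfl
  rw [h1]
  have h2 := pvStage2 verb (PySem.Dict.ofList data).items []
    (by simpa [List.map_map] using hnd)
  simp only [List.nil_append] at h2
  rw [h2]

-- ---- assembly: stage C (B's transposed columns, read back row by row, yield the pvCinner rows) ----
theorem pvStageC (data : List (String × List Int)) (verb : List Int) :
    (PySem.List.enumerate (PySem.Dict.ofList data).keys 0).foldl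
      (fun a p => a.insert p.2 (PySem.Dict.ofList ((verb.map (fun i => PySem.Int.toStr i)).zip
        ((verb.map (fun gift => (PySem.Dict.ofList data).values.map (fun value => pvWeight value gift))).map
          (fun col => PySem.List.pyGetD col p.1 0)))))
      PySem.Dict.empty
      = PySem.Dict.mk ((PySem.Dict.ofList data).items.map (fun kv => (kv.1, pvCinner verb kv.2))) := by
  have hnd : ((PySem.Dict.ofList data).items.map (·.1)).Nodup := PySem.Dict.nodup_keys_ofList data
  have hnd2 : ((PySem.List.enumerate (PySem.Dict.ofList data).keys 0).map (·.2)).Nodup := by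
    rw [PySem.List.map_snd_enumerate]
    exact hnd
  apply PySem.Dict.ext
  refine Eq.trans (PySem.Dict.items_foldl_insert_fresh (PySem.List.enumerate (PySem.Dict.ofList data).keys 0)
    (fun p => p.2)
    (fun p => PySem.Dict.ofList ((verb.map (fun i => PySem.Int.toStr i)).zip
        ((verb.map (fun gift => (PySem.Dict.ofList data).values.map (fun value => pvWeight value gift))).map
          (fun col => PySem.List.pyGetD col p.1 0))))
    PySem.Dict.empty (fun a _ => PySem.Dict.contains_empty a.2) hnd2) ?_
  show [] ++ _ = _
  rw [List.nil_append]
  apply List.ext_getElem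
  · simp [PySem.List.length_enumerate, PySem.Dict.keys]
  · intro k hk hk'
    have hklt : k < (PySem.Dict.ofList data).items.length := by
      simpa [PySem.List.length_enumerate, PySem.Dict.keys] using hk
    have hkeys : k < (PySem.Dict.ofList data).keys.length := by
      simpa [PySem.Dict.keys] using hklt
    rw [List.getElem_map, List.getElem_map, PySem.List.getElem_enumerate]
    beta_reduce
    have hfst : (PySem.Dict.ofList data).keys[k] = (PySem.Dict.ofList data).items[k].1 := by
      simp [PySem.Dict.keys]
    have hrow : (verb.map (fun gift => (PySem.Dict.ofList data).values.map (fun value => pvWeight value gift))).map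
          (fun col => PySem.List.pyGetD col ((0 : Int) + (k : Int)) 0)
        = verb.map (fun g => pvWeight ((PySem.Dict.ofList data).items[k].2) g) := by
      rw [List.map_map]
      apply List.map_congr_left
      intro g _
      show PySem.List.pyGetD ((PySem.Dict.ofList data).values.map (fun value => pvWeight value g)) ((0 : Int) + (k : Int)) 0 = _
      rw [zero_add, PySem.List.pyGetD_natCast]
      have hv : k < ((PySem.Dict.ofList data).values.map (fun value => pvWeight value g)).length := by
        simpa [PySem.Dict.values] using hklt
      rw [List.getD_eq_getElem _ _ hv, List.getElem_map]
      congr 1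
      simp [PySem.Dict.values]
    rw [hrow, hfst]
    rfl

-- ===== VERDICT helper =====
theorem gen_adjazenz_greedy_spec : Claim_equal_gen_adjazenz_greedy := by
  intro data verb _
  show gen_adjazenz_greedy data verb = gen_adjazenz_greedy_alt data verb
  simp only [gen_adjazenz_greedy, gen_adjazenz_greedy_alt]
  rw [pvStageA data verb, pvStageC data verb]
  have hrows : (PySem.Dict.ofList data).items.map (fun kv => (kv.1, pvAinner verb kv.2))
      = (PySem.Dict.ofList data).items.map (fun kv => (kv.1, pvCinner verb kv.2)) := by
    apply List.map_congr_left
    intro kv _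
    rw [pvInnerEq]
  rw [hrows]
  simp only [Prod.mk.injEq, and_true]
  apply congrArg (fun (dd : PySem.Dict String (PySem.Dict String Int)) => dd.items.map (fun p => (p.1, p.2.items)))
  have hZ : PySem.Dict.ofList ((PySem.Dict.ofList data).keys.map (fun key => (key, (0 : Int))))
      = (PySem.Dict.ofList data).keys.foldl (fun inner k => inner.insert k 0) PySem.Dict.empty := by
    rw [pvOfList, List.foldl_map]
  have hndM : (PySem.Dict.mk ((PySem.Dict.ofList data).items.map (fun kv => (kv.1, pvCinner verb kv.2)))).keys.Nodup := by
    show (((PySem.Dict.ofList data).items.map (fun kv => (kv.1, pvCinner verb kv.2))).map (·.1)).Nodup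
    rw [List.map_map]
    exact PySem.Dict.nodup_keys_ofList data
  rw [← hZ]
  refine (pvUpdFold _ ((verb.map (fun i => PySem.Int.toStr i))) PySem.Dict.empty _ hndM
    (by rw [PySem.Dict.keys_empty]; exact List.nodup_nil)
    (fun k v h => by rw [PySem.Dict.get?_empty] at h; cases h)).trans rfl
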